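-- pv_equiv track=rewrite | github.com/jackson1488/students | backend/app/routes/academy.py | _normalize_group_prefix
-- ===== SOURCE A (Python) =====
-- def _normalize_group_prefix(group_name):
--     raw = str(group_name or "").strip().lower()
--     cleaned = []
--     prev_dash = False
--
--     for ch in raw:
--         if ch.isalnum():
--             cleaned.append(ch)
--             prev_dash = False
--         elif ch in {"-", "_"}:
--             cleaned.append(ch)
--             prev_dash = False
--         elif ch in {" ", "/", "\\"}:
--             if not prev_dash:
--                 cleaned.append("-")
--                 prev_dash = True
--
--     prefix = "".join(cleaned).strip("-_")
--     return prefix or "group"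
-- ===== SOURCE B (Python) =====
-- def _normalize_group_prefix(group_name):
--     raw = str(group_name or "").strip().lower()
--     seps = " /\\"
--     kept = [ch for ch in raw if ch.isalnum() or ch in "-_" or ch in seps]
--     collapsed = "".join(
--         "-" if ch in seps else ch
--         for prev, ch in zip([None] + kept, kept)
--         if ch not in seps or prev is None or prev not in seps)
--     prefix = collapsed.strip("-_")
--     return prefix or "group"
-- ===== Notes on version B (the rewrite author's own statement) =====
-- stated objective: alternative
-- what changed: Replaces A's single stateful scan (prev_dash flag driving per-character branches) by a filter pass that keeps only meaningful characters followed by a stateless pairwise comprehension over the kept list zipped with its own shift, which collapses separator runs by looking at the previous kept character.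
import Mathlib
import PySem

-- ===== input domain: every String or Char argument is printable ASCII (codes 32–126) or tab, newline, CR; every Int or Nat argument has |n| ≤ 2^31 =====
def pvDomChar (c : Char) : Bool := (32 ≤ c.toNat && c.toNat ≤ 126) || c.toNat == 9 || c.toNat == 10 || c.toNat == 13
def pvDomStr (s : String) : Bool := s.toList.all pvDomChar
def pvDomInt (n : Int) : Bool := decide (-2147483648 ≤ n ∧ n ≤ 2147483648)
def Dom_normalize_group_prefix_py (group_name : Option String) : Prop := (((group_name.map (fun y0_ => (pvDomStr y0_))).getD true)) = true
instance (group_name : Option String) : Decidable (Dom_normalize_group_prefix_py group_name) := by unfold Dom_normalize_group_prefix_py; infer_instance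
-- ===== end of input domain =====

-- B replaces A's stateful prev_dash scan by a filter pass followed by a stateless
-- pairwise comprehension over the list zipped with its own shift (objective: alternative).

-- ===== PORT A =====
-- A-side helper: the loop body of A's single scan (state: cleaned list, prev_dash flag)
def pvStepA (st : List Char × Bool) (ch : Char) : List Char × Bool :=
  if PySem.Chars.isalnum ch then (st.1 ++ [ch], false)
  else if ch == '-' || ch == '_' then (st.1 ++ [ch], false)
  else if ch == ' ' || ch == '/' || ch == '\\' then
    (if !st.2 then (st.1 ++ ['-'], true) else st)
  else st

def normalize_group_prefix_py (group_name : Option String) : String :=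
  -- `str(group_name or "")`: None gives "", and `or` also maps Some "" to "" (same value)
  let raw := PySem.Str.lower (PySem.Str.strip (group_name.getD ""))
  let st := raw.toList.foldl pvStepA ([], false)
  let pre := PySem.Chars.stripChars st.1 ['-', '_']
  if pre.isEmpty then "group" else String.ofList pre

-- ===== PORT B =====
-- B-side helper: `ch in seps` with seps = " /\\"
def pvIsSep (ch : Char) : Bool := ch == ' ' || ch == '/' || ch == '\\'

def normalize_group_prefix_py_alt (group_name : Option String) : String :=
  let raw := PySem.Str.lower (PySem.Str.strip (group_name.getD ""))
  let kept := raw.toList.filter (fun ch =>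
      PySem.Chars.isalnum ch || ch == '-' || ch == '_' || pvIsSep ch)
  -- `zip([None] + kept, kept)`; `prev not in seps` is only reached when prev is not
  -- None (short-circuit), so the `.getD ' '` default is never the decisive value
  let collapsed := (((none :: kept.map some).zip kept).filter (fun p =>
      !(pvIsSep p.2) || p.1.isNone || !(pvIsSep (p.1.getD ' ')))).map (fun p =>
      if pvIsSep p.2 then '-' else p.2)
  let pre := PySem.Chars.stripChars collapsed ['-', '_']
  if pre.isEmpty then "group" else String.ofList pre

-- ===== PRECONDITION & SPEC =====
def Spec_normalize_group_prefix_py (group_name : Option String) (out : String) : Prop := out = normalize_group_prefix_py_alt group_name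
instance (group_name : Option String) (out : String) : Decidable (Spec_normalize_group_prefix_py group_name out) := by unfold Spec_normalize_group_prefix_py; infer_instance

-- ===== CLAIM (what is proved, stated in full; the proofs are below) =====
def Claim_equal_normalize_group_prefix_py : Prop := ∀ (group_name : Option String), Dom_normalize_group_prefix_py group_name → Spec_normalize_group_prefix_py group_name (normalize_group_prefix_py group_name)

-- ===== LEMMAS AND PROOFS =====

-- common reference recursion: pd is A's prev_dash, the list is the already-filtered input
def pvPair : Bool → List Char → List Char
  | _, [] => []
  | pd, c :: cs =>
      if pvIsSep c then (if pd then pvPair true cs else '-' :: pvPair true cs)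
      else c :: pvPair false cs

theorem pvSep_not_alnum (c : Char) (h : pvIsSep c = true) :
    PySem.Chars.isalnum c = false := by
  simp only [pvIsSep, Bool.or_eq_true, beq_iff_eq] at h
  rcases h with (h | h) | h <;> subst h <;> decide

-- A's fold over any list equals pvPair on the filtered list
theorem pvFoldA (cs : List Char) : ∀ (acc : List Char) (pd : Bool),
    (cs.foldl pvStepA (acc, pd)).1
    = acc ++ pvPair pd (cs.filter (fun ch =>
        PySem.Chars.isalnum ch || ch == '-' || ch == '_' || pvIsSep ch)) := by
  induction cs with
  | nil => intro acc pd; simp [pvPair]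
  | cons c cs ih =>
    intro acc pd
    rw [List.foldl_cons]
    by_cases ha : PySem.Chars.isalnum c = true
    · have hs : pvIsSep c = false := by
        cases hsc : pvIsSep c
        · rfl
        · exact absurd ha (by simp [pvSep_not_alnum c hsc])
      have h1 : pvStepA (acc, pd) c = (acc ++ [c], false) := by simp [pvStepA, ha]
      rw [h1, ih]
      simp [ha, hs, pvPair]
    · by_cases hd : (c == '-' || c == '_') = true
      · have hs : pvIsSep c = false := by
          simp only [Bool.or_eq_true, beq_iff_eq] at hd
          rcases hd with h | h <;> subst h <;> decide
        have h1 : pvStepA (acc, pd) c = (acc ++ [c], false) := by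
          simp [pvStepA, ha, hd]
        rw [h1, ih]
        simp only [Bool.or_eq_true, beq_iff_eq] at hd
        rcases hd with h | h <;> subst h <;> simp [pvPair, pvIsSep]
      · by_cases hsep : (c == ' ' || c == '/' || c == '\\') = true
        · have hs : pvIsSep c = true := by
            simp only [pvIsSep]; simpa using hsep
          cases pd with
          | false =>
            have h1 : pvStepA (acc, false) c = (acc ++ ['-'], true) := by
              simp [pvStepA, ha, hd, hsep]
            rw [h1, ih]
            simp [hs, pvPair]
          | true =>
            have h1 : pvStepA (acc, true) c = (acc, true) := by
              simp [pvStepA, ha, hd, hsep]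
            rw [h1, ih]
            simp [hs, pvPair]
        · have hs : pvIsSep c = false := by
            simp only [pvIsSep]; simpa using hsep
          have h1 : pvStepA (acc, pd) c = (acc, pd) := by
            simp [pvStepA, ha, hd, hsep]
          rw [h1, ih]
          simp [ha, hd, hs]

-- B's zip-with-shift comprehension equals pvPair; prev carries the shifted element
theorem pvZipB (ks : List Char) : ∀ (prev : Option Char),
    (((prev :: ks.map some).zip ks).filter (fun p =>
      !(pvIsSep p.2) || p.1.isNone || !(pvIsSep (p.1.getD ' ')))).map (fun p =>
      if pvIsSep p.2 then '-' else p.2)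
    = pvPair (match prev with | none => false | some p => pvIsSep p) ks := by
  induction ks with
  | nil => intro prev; simp [pvPair]
  | cons c cs ih =>
    intro prev
    by_cases hs : pvIsSep c = true
    · cases prev with
      | none => simp [hs, ih (some c), pvPair]
      | some p =>
        cases hp : pvIsSep p <;>
          simp [hs, hp, ih (some c), pvPair]
    · have hs' : pvIsSep c = false := by simpa using hs
      cases prev <;> simp [hs', ih (some c), pvPair]

theorem pvMain (group_name : Option String) :
    normalize_group_prefix_py group_name = normalize_group_prefix_py_alt group_name := by
  simp only [normalize_group_prefix_py, normalize_group_prefix_py_alt]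
  rw [pvFoldA, pvZipB]
  simp

-- ===== VERDICT (by name: the statement is the Claim_ definition above) =====
theorem normalize_group_prefix_py_spec : Claim_equal_normalize_group_prefix_py := by
  intro g _
  unfold Spec_normalize_group_prefix_py
  exact pvMain g
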